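-- pv_equiv track=rewrite | github.com/shanesatterfield/hacker-rank | Python/Python/Collections/DefaultDict_Tutorial/__main__.py | defaultdict
-- ===== SOURCE A (Python) =====
-- def defaultdict(arr, key):
--     diction = dict()
--     for k in key:
--         diction[k] = []
--
--     for i in range(len(arr)):
--         if arr[i] in diction:
--             diction[arr[i]].append(i+1)
--
--     result = []
--     for x in key:
--         curr = diction[x]
--         if len(curr) == 0:
--             curr = [-1]
--         result.append(curr)
--
--     return result
-- ===== SOURCE B (Python) =====
-- def defaultdict(arr, key):
--     # No dictionary at all: for each key, scan arr directly for its 1-based positions.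
--     return [[i + 1 for i, v in enumerate(arr) if v == x] or [-1] for x in key]
-- ===== Notes on version B (the rewrite author's own statement) =====
-- stated objective: alternative
-- what changed: B drops the dictionary entirely: instead of seeding keys and indexing positions in a hash map, it answers each key by a direct comprehension scan of arr collecting 1-based positions, with 'or [-1]' for an empty result.
import Mathlib
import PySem

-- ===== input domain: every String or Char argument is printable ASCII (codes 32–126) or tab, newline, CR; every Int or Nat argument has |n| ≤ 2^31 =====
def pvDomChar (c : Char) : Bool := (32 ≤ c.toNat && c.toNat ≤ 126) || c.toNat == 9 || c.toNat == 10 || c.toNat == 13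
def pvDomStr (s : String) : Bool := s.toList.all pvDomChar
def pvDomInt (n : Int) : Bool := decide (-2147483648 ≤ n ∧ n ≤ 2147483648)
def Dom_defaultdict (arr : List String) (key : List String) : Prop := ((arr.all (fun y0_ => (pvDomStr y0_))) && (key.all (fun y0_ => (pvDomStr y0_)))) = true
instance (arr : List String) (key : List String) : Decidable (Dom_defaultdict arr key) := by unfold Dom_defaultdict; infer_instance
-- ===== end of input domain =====

-- B drops A's dictionary entirely: each key is answered by a direct scan of arr
-- collecting its 1-based positions (or [-1] if none) — alternative decomposition, no index.

-- ===== PORT A =====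
def defaultdict (arr : List String) (key : List String) : List (List Int) :=
  let diction0 : PySem.Dict String (List Int) :=
    key.foldl (fun d k => d.insert k ([] : List Int)) PySem.Dict.empty
  let diction : PySem.Dict String (List Int) :=
    (PySem.List.pyRange 0 (PySem.List.len arr) 1).foldl
      (fun d i =>
        -- arr[i]: exact, i ranges over range(len(arr)) so the index is always in range
        let x := PySem.List.pyGetD arr i ""
        if d.contains x then d.modify x [] (fun l => l ++ [i + 1]) else d)
      diction0
  -- diction[x]: exact, every x ∈ key was seeded in the first loop, so the key is present
  key.foldl (fun result x =>
      let curr := diction.getD x []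
      let curr := if curr.length = 0 then ([-1] : List Int) else curr
      result ++ [curr]) []

-- ===== PORT B =====
def defaultdict_alt (arr : List String) (key : List String) : List (List Int) :=
  key.map (fun x =>
    let ps := ((PySem.List.enumerate arr).filter (fun p => p.2 == x)).map (fun p => p.1 + 1)
    if ps = [] then [-1] else ps)

-- ===== PRECONDITION & SPEC =====
def Spec_defaultdict (arr : List String) (key : List String) (out : List (List Int)) : Prop := out = defaultdict_alt arr key
instance (arr : List String) (key : List String) (out : List (List Int)) : Decidable (Spec_defaultdict arr key out) := by unfold Spec_defaultdict; infer_instance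

-- ===== CLAIM (what is proved, stated in full; the proofs are below) =====
def Claim_equal_defaultdict : Prop := ∀ (arr : List String) (key : List String), Dom_defaultdict arr key → Spec_defaultdict arr key (defaultdict arr key)

-- ===== LEMMAS AND PROOFS =====

-- 1-based positions of x among the enumerated pairs l (what both versions produce per key).
def pvOcc (l : List (Int × String)) (x : String) : List Int :=
  (l.filter (fun p => p.2 == x)).map (fun p => p.1 + 1)

theorem pvOcc_cons (p : Int × String) (t : List (Int × String)) (x : String) :
    pvOcc (p :: t) x = (if p.2 = x then [p.1 + 1] else []) ++ pvOcc t x := by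
  by_cases h : p.2 = x <;> simp [pvOcc, h]

-- A's counting loop: the value at x grows by pvOcc exactly while x is present.
theorem A_loop_getD (l : List (Int × String)) (d : PySem.Dict String (List Int)) (x : String) :
    (l.foldl (fun d p => if d.contains p.2 then d.modify p.2 [] (fun v => v ++ [p.1 + 1]) else d) d).getD x []
      = d.getD x [] ++ (if d.contains x then pvOcc l x else []) := by
  induction l generalizing d with
  | nil => simp [pvOcc]
  | cons p t ih =>
    simp only [List.foldl_cons, pvOcc_cons]
    by_cases h : d.contains p.2
    · simp only [h, if_pos]
      rw [ih, PySem.Dict.getD_modify, PySem.Dict.contains_modify]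
      by_cases hx : x = p.2
      · subst hx; simp [h, List.append_assoc]
      · simp [hx, Ne.symm hx]
    · simp only [h, Bool.false_eq_true, if_false]
      rw [ih]
      by_cases hx : x = p.2
      · subst hx; simp [h]
      · simp [Ne.symm hx]

-- A's seeding loop: every stored value is [], and every key of `key` is present afterwards.
theorem seed_getD (key : List String) (d : PySem.Dict String (List Int)) (x : String)
    (h : d.getD x [] = []) :
    (key.foldl (fun d k => d.insert k ([] : List Int)) d).getD x [] = [] := by
  induction key generalizing d with
  | nil => exact h
  | cons k t ih =>
    simp only [List.foldl_cons]
    exact ih _ (by rw [PySem.Dict.getD_insert]; by_cases hx : x = k <;> simp [hx, h])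

theorem seed_contains (key : List String) (d : PySem.Dict String (List Int)) (x : String)
    (hx : x ∈ key ∨ d.contains x = true) :
    (key.foldl (fun d k => d.insert k ([] : List Int)) d).contains x = true := by
  induction key generalizing d with
  | nil => simpa using hx
  | cons k t ih =>
    simp only [List.foldl_cons]
    refine ih _ ?_
    rw [PySem.Dict.contains_insert]
    rcases hx with hx | hx
    · rcases List.mem_cons.mp hx with h | h
      · subst h; simp
      · exact Or.inl h
    · simp [hx]

-- Per-key agreement: A's dict value for x ∈ key is exactly pvOcc, with [-1] for empty.
theorem per_key (l : List (Int × String)) (key : List String) (x : String) (hx : x ∈ key) :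
    (let curr := (l.foldl (fun d p => if d.contains p.2 then d.modify p.2 [] (fun v => v ++ [p.1 + 1]) else d)
        (key.foldl (fun d k => d.insert k ([] : List Int)) PySem.Dict.empty)).getD x [];
     if curr.length = 0 then ([-1] : List Int) else curr)
      = (if pvOcc l x = [] then [-1] else pvOcc l x) := by
  simp only []
  rw [A_loop_getD, seed_getD key _ x (by simp),
      seed_contains key _ x (Or.inl hx)]
  by_cases h : pvOcc l x = [] <;> simp [h, List.length_eq_zero_iff]

-- ===== VERDICT (by name: the statement is the Claim_ definition above) =====
theorem defaultdict_spec : Claim_equal_defaultdict := by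
  intro arr key _
  unfold Spec_defaultdict defaultdict defaultdict_alt
  rw [PySem.List.foldl_append_singleton_eq_map, List.nil_append]
  have hA : ∀ d : PySem.Dict String (List Int),
      (PySem.List.pyRange 0 (PySem.List.len arr) 1).foldl
        (fun d i =>
          let x := PySem.List.pyGetD arr i ""
          if d.contains x then d.modify x [] (fun l => l ++ [i + 1]) else d) d
        = (PySem.List.enumerate arr).foldl
            (fun d p => if d.contains p.2 then d.modify p.2 [] (fun v => v ++ [p.1 + 1]) else d) d := by
    intro d
    rw [PySem.List.enumerate_eq_map_pyRange arr "", List.foldl_map]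
  rw [hA]
  exact List.map_congr_left (fun x hx => per_key (PySem.List.enumerate arr) key x hx)
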